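-- pv_equiv track=rewrite | github.com/LucaMica02/AlgorithmsCourseSapienza | Greedy/Greedy_Exercises.py | maxElements
-- ===== SOURCE A (Python) =====
-- def maxElements(A, B):
--     n = len(A)
--     res = [None] * n
--     diff = [(A[i] - B[i], i) for i in range(n)]
--     diff.sort(reverse = True)
--     for i in range(n // 2):
--         val, ind = diff[i]
--         res[ind] = A[ind]
--     for i in range(n):
--         if not res[i]:
--             res[i] = B[i]
--     return res
-- ===== SOURCE B (Python) =====
-- def _topk(xs, k):
--     """The k largest elements of xs (any order), by quickselect-style partitioning."""
--     if k == 0: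
--         return []
--     if len(xs) <= k:
--         return xs
--     pivot = xs[len(xs) // 2]
--     big = [x for x in xs if x > pivot]
--     eqs = [x for x in xs if x == pivot]
--     small = [x for x in xs if x < pivot]
--     if k <= len(big):
--         return _topk(big, k)
--     if k <= len(big) + len(eqs):
--         return big + eqs[:k - len(big)]
--     return big + eqs + _topk(small, k - len(big) - len(eqs))
--
--
-- def maxElements(A, B):
--     n = len(A)
--     k = n // 2
--     keys = [(A[i] - B[i], i) for i in range(n)]
--     top = _topk(keys, k)
--     sel = set(i for _, i in top)
--     return [A[i] if i in sel else B[i] for i in range(n)]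
-- ===== Notes on version B (the rewrite author's own statement) =====
-- stated objective: alternative
-- what changed: B replaces A's full descending sort of the (A[i]-B[i], i) keys by a quickselect-style recursive partition that extracts only the top n//2 keys, and does not reproduce A's 'if not res[i]' truthiness slip.
-- intended difference: On inputs where some selected top-half index j has A[j] == 0 and B[j] != 0, A's truthiness test 'if not res[i]' overwrites the selected A[j] = 0 with B[j], while B returns the intended selected value A[j] = 0. — e.g. on maxElements([0, -5], [3, 1]): A returns [3, 1], B returns [0, 1]
import Mathlib
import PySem

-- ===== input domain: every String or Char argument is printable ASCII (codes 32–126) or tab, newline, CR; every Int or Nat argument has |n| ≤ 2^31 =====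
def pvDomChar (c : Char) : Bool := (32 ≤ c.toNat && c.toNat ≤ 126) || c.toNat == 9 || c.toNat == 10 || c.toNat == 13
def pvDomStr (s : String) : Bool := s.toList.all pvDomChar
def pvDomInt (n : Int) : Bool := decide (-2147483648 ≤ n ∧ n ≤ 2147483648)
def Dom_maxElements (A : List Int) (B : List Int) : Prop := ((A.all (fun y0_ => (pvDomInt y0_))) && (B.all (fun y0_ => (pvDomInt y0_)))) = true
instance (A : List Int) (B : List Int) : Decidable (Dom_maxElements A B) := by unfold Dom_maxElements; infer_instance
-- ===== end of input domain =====

-- B replaces A's full descending sort by a quickselect-style partition of the top n//2 keys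
-- and does not reproduce A's truthiness slip ('if not res[i]') that drops a selected A[i] == 0.

-- ===== PORT A =====
-- Python truthiness of a value that is None or an int: falsy iff None or 0.
def pvFalsy (o : Option Int) : Bool :=
  match o with
  | none => true
  | some v => v == 0

def maxElements (A : List Int) (B : List Int) : List Int :=
  let n : Int := PySem.List.len A
  let res0 : List (Option Int) := List.replicate n.toNat none   -- [None] * n
  let diff : List (Int × Int) :=
    (PySem.List.pyRange 0 n).map (fun i => (PySem.List.pyGetD A i 0 - PySem.List.pyGetD B i 0, i))
  -- diff.sort(reverse=True): Python compares the int pairs lexicographically = the `toLex` order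
  let diffS := PySem.List.sorted diff (fun p => toLex p) true
  let res1 := (PySem.List.pyRange 0 (PySem.Int.floordiv n 2)).foldl
    (fun r i =>
      let p := PySem.List.pyGetD diffS i (0, 0)
      PySem.List.pySetD r p.2 (some (PySem.List.pyGetD A p.2 0))) res0
  let res2 := (PySem.List.pyRange 0 n).foldl
    (fun r i =>
      if pvFalsy (PySem.List.pyGetD r i none) then
        PySem.List.pySetD r i (some (PySem.List.pyGetD B i 0))
      else r) res1
  -- after the second loop every entry is `some`; return the ints
  res2.map (fun o => o.getD 0)

-- ===== PORT B =====
-- Python's `x > y` on int pairs (tuple comparison = lexicographic).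
def pairGt (x y : Int × Int) : Bool :=
  decide (y.1 < x.1) || (x.1 == y.1 && decide (y.2 < x.2))

-- _topk of Source B; `fuel` only makes the recursion structural (any fuel ≥ xs.length is enough).
def topkB (fuel : Nat) (xs : List (Int × Int)) (k : Nat) : List (Int × Int) :=
  match fuel with
  | 0 => []
  | fuel + 1 =>
    if k = 0 then []
    else if xs.length ≤ k then xs
    else
      let pivot := xs.getD (xs.length / 2) (0, 0)   -- xs[len(xs)//2]; the index is provably in range here
      let big := xs.filter (fun x => pairGt x pivot)
      let eqs := xs.filter (fun x => x == pivot)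
      let small := xs.filter (fun x => pairGt pivot x)
      if k ≤ big.length then topkB fuel big k
      else if k ≤ big.length + eqs.length then big ++ eqs.take (k - big.length)
      else big ++ eqs ++ topkB fuel small (k - big.length - eqs.length)

def maxElements_alt (A : List Int) (B : List Int) : List Int :=
  let n := A.length
  let k := n / 2
  let keys := (PySem.List.pyRange 0 (n : Int)).map
    (fun i => (PySem.List.pyGetD A i 0 - PySem.List.pyGetD B i 0, i))
  let top := topkB keys.length keys k
  let sel : PySem.Set Int := PySem.Set.ofList (top.map (·.2))
  (PySem.List.pyRange 0 (n : Int)).map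
    (fun i => if PySem.Set.contains sel i then PySem.List.pyGetD A i 0 else PySem.List.pyGetD B i 0)

-- ===== PRECONDITION & SPEC =====
-- A raises IndexError (B[i]) when B is shorter than A; exactly those inputs are excluded.
def Pre_maxElements (A : List Int) (B : List Int) : Prop := A.length ≤ B.length
instance (A : List Int) (B : List Int) : Decidable (Pre_maxElements A B) := by
  unfold Pre_maxElements; infer_instance

def pvWitness_maxElements : List Int × List Int := ([1, 2], [0, 0])

-- On inputs where some index j of the selected top-half has A[j] == 0 and B[j] ≠ 0, A's
-- truthiness test `if not res[i]` overwrites the selected A[j] = 0 with B[j], while B returns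
-- the intended selected value A[j] = 0.
def D_maxElements (A : List Int) (B : List Int) : Prop :=
  ∃ j ∈ List.range A.length, A.getD j 0 = 0 ∧ B.getD j 0 ≠ 0 ∧
    (List.range A.length).countP
      (fun i => decide (toLex (A.getD j 0 - B.getD j 0, (j : Int)) <
                        toLex (A.getD i 0 - B.getD i 0, (i : Int)))) < A.length / 2
instance (A : List Int) (B : List Int) : Decidable (D_maxElements A B) := by
  unfold D_maxElements; infer_instance

def Spec_maxElements (A : List Int) (B : List Int) (out : List Int) : Prop :=
  ¬ D_maxElements A B → out = maxElements_alt A B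
instance (A : List Int) (B : List Int) (out : List Int) : Decidable (Spec_maxElements A B out) := by
  unfold Spec_maxElements; infer_instance

def pvDiffWitness_maxElements : List Int × List Int := ([0, -5], [3, 1])
def pvDiffWitnessOut_maxElements : (List Int) × (List Int) := ([3, 1], [0, 1])

-- ===== CLAIM (what is proved, stated in full; the proofs are below) =====
def Claim_unchanged_maxElements : Prop := ∀ (A : List Int) (B : List Int), Dom_maxElements A B → Pre_maxElements A B → Spec_maxElements A B (maxElements A B)
def Claim_changed_maxElements : Prop := Dom_maxElements (pvDiffWitness_maxElements.1) (pvDiffWitness_maxElements.2) ∧ Pre_maxElements (pvDiffWitness_maxElements.1) (pvDiffWitness_maxElements.2) ∧ D_maxElements (pvDiffWitness_maxElements.1) (pvDiffWitness_maxElements.2) ∧ maxElements (pvDiffWitness_maxElements.1) (pvDiffWitness_maxElements.2) = pvDiffWitnessOut_maxElements.1 ∧ maxElements_alt (pvDiffWitness_maxElements.1) (pvDiffWitness_maxElements.2) = pvDiffWitnessOut_maxElements.2 ∧ pvDiffWitnessOut_maxElements.1 ≠ pvDiffWitnessOut_maxElements.2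
def Claim_exact_maxElements : Prop := ∀ (A : List Int) (B : List Int), Dom_maxElements A B → Pre_maxElements A B → D_maxElements A B → maxElements A B ≠ maxElements_alt A B

-- ===== LEMMAS AND PROOFS =====

-- the sort/selection key of index i
def pvKey (A B : List Int) (i : Nat) : Int × Int := (A.getD i 0 - B.getD i 0, (i : Int))

-- "index j is among the top n//2 keys"
abbrev pvSelected (A B : List Int) (j : Nat) : Prop :=
  (List.range A.length).countP
    (fun i => decide (toLex (pvKey A B j) < toLex (pvKey A B i))) < A.length / 2

theorem pvKey_injective (A B : List Int) : Function.Injective (pvKey A B) := by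
  intro i j h
  have := congrArg Prod.snd h
  simpa [pvKey] using this

theorem pairGt_eq (x y : Int × Int) : pairGt x y = decide (toLex y < toLex x) := by
  rcases x with ⟨x1, x2⟩; rcases y with ⟨y1, y2⟩
  rw [Bool.eq_iff_iff]
  simp only [pairGt, Bool.or_eq_true, Bool.and_eq_true, decide_eq_true_eq, beq_iff_eq,
    Prod.Lex.lt_iff, ofLex_toLex]
  omega

-- proof-side names for A's intermediate values (definitionally the port's let-bindings)
def pvDiff (A B : List Int) : List (Int × Int) :=
  (PySem.List.pyRange 0 (PySem.List.len A)).map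
    (fun i => (PySem.List.pyGetD A i 0 - PySem.List.pyGetD B i 0, i))

def pvS (A B : List Int) : List (Int × Int) :=
  PySem.List.sorted (pvDiff A B) (fun p => toLex p) true

def pvRes1 (A B : List Int) : List (Option Int) :=
  (PySem.List.pyRange 0 (PySem.Int.floordiv (PySem.List.len A) 2)).foldl
    (fun r i =>
      let p := PySem.List.pyGetD (pvS A B) i (0, 0)
      PySem.List.pySetD r p.2 (some (PySem.List.pyGetD A p.2 0)))
    (List.replicate (PySem.List.len A).toNat none)

def pvRes2 (A B : List Int) : List (Option Int) :=
  (PySem.List.pyRange 0 (PySem.List.len A)).foldl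
    (fun r i =>
      if pvFalsy (PySem.List.pyGetD r i none) then
        PySem.List.pySetD r i (some (PySem.List.pyGetD B i 0))
      else r) (pvRes1 A B)

theorem maxElements_eq (A B : List Int) :
    maxElements A B = (pvRes2 A B).map (fun o => o.getD 0) := rfl

theorem pvDiff_eq (A B : List Int) : pvDiff A B = (List.range A.length).map (pvKey A B) := by
  unfold pvDiff
  rw [PySem.List.len_eq, PySem.List.pyRange_zero_natCast, List.map_map]
  apply List.map_congr_left
  intro i _
  simp [pvKey]

theorem pvDiff_nodup (A B : List Int) : (pvDiff A B).Nodup := by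
  rw [pvDiff_eq]
  exact List.nodup_range.map (pvKey_injective A B)

theorem pvS_perm (A B : List Int) : (pvS A B).Perm (pvDiff A B) :=
  PySem.List.sorted_perm _ _ _

theorem pvS_length (A B : List Int) : (pvS A B).length = A.length := by
  rw [(pvS_perm A B).length_eq, pvDiff_eq, List.length_map, List.length_range]

theorem pvS_sorted (A B : List Int) :
    (pvS A B).Pairwise (fun a b => toLex b < toLex a) := by
  have h1 : (pvS A B).Pairwise (fun a b => toLex b ≤ toLex a) :=
    PySem.List.sorted_pairwise_rev _ _
  have h2 : (pvS A B).Nodup := (pvS_perm A B).nodup_iff.mpr (pvDiff_nodup A B)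
  have := h1.and h2
  apply this.imp
  rintro a b ⟨hle, hne⟩
  exact lt_of_le_of_ne hle (fun h => hne (toLex.injective h.symm))

theorem pvS_mem (A B : List Int) (p : Int × Int) :
    p ∈ pvS A B ↔ ∃ i < A.length, p = pvKey A B i := by
  rw [(pvS_perm A B).mem_iff, pvDiff_eq]
  simp [eq_comm]

-- x ∈ S.take k ↔ fewer than k elements of S are above x, for strictly descending S
theorem mem_take_iff_countP :
    ∀ (S : List (Int × Int)), S.Pairwise (fun a b => toLex b < toLex a) →
      ∀ x ∈ S, ∀ (k : Nat),
        (x ∈ S.take k ↔ S.countP (fun y => decide (toLex x < toLex y)) < k) := by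
  intro S
  induction S with
  | nil => intro _ x hx; exact absurd hx (List.not_mem_nil)
  | cons h t ih =>
    intro hp x hx k
    rw [List.pairwise_cons] at hp
    rcases List.mem_cons.mp hx with rfl | hxt
    · have hcnt : (x :: t).countP (fun y => decide (toLex x < toLex y)) = 0 := by
        rw [List.countP_eq_zero]
        intro y hy
        rcases List.mem_cons.mp hy with rfl | hyt
        · simp
        · simpa using not_lt_of_gt (hp.1 y hyt)
      rw [hcnt]
      cases k with
      | zero => simp
      | succ m => simp [List.take_succ_cons]
    · have hxh : toLex x < toLex h := hp.1 x hxt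
      have hcnt : (h :: t).countP (fun y => decide (toLex x < toLex y)) =
          t.countP (fun y => decide (toLex x < toLex y)) + 1 := by
        rw [List.countP_cons]
        simp [hxh]
      rw [hcnt]
      cases k with
      | zero => simp
      | succ m =>
        rw [List.take_succ_cons, List.mem_cons]
        have hne : x ≠ h := fun he => absurd hxh (by rw [he]; exact lt_irrefl _)
        rw [ih hp.2 x hxt m]
        constructor
        · rintro (rfl | hm)
          · exact absurd rfl hne
          · omega
        · intro hlt; right; omega

-- loop-shape: a fold over range(m) reading xs[i] is a fold over xs.take m
theorem foldl_pyRange_take {α β : Type} (xs : List α) (d : α) (f : β → α → β) :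
    ∀ (m : Nat) (init : β), m ≤ xs.length →
      (PySem.List.pyRange 0 (m : Int)).foldl
          (fun acc j => f acc (PySem.List.pyGetD xs j d)) init
        = (xs.take m).foldl f init := by
  intro m
  induction m with
  | zero => intro init _; simp [PySem.List.pyRange]
  | succ m ih =>
    intro init hm
    have hcast : ((m + 1 : Nat) : Int) = (m : Int) + 1 := by push_cast; ring
    rw [hcast, PySem.List.pyRange_one_succ_right (by omega), List.foldl_append]
    rw [ih init (by omega)]
    have hmlt : m < xs.length := by omega
    have htake : xs.take (m + 1) = xs.take m ++ [xs[m]] := by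
      rw [List.take_add_one, List.getElem?_eq_getElem hmlt, Option.toList_some]
    rw [htake, List.foldl_append, List.foldl_cons, List.foldl_nil]
    congr 1
    rw [PySem.List.pyGetD_natCast, List.getD_eq_getElem _ _ hmlt]

theorem length_foldl_set {α β : Type} (g : β → Int) (v : β → α) :
    ∀ (ps : List β) (r : List α),
      (ps.foldl (fun r p => PySem.List.pySetD r (g p) (v p)) r).length = r.length := by
  intro ps
  induction ps with
  | nil => intro r; rfl
  | cons p ps ih => intro r; rw [List.foldl_cons, ih, PySem.List.length_pySetD]

-- the first loop: position j holds v(j) iff some visited pair has second component j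
theorem foldl_set_getElem? {α : Type} (v : Int → α) :
    ∀ (ps : List (Int × Int)) (r : List α) (j : Nat), j < r.length → (∀ p ∈ ps, 0 ≤ p.2) →
      (ps.foldl (fun r p => PySem.List.pySetD r p.2 (v p.2)) r)[j]? =
        if ∃ p ∈ ps, p.2 = (j : Int) then some (v (j : Int)) else r[j]? := by
  intro ps
  induction ps with
  | nil => intro r j hj _; simp
  | cons p ps ih =>
    intro r j hj hpos
    rw [List.foldl_cons]
    have hp2 : 0 ≤ p.2 := hpos p List.mem_cons_self
    rw [PySem.List.pySetD_of_nonneg _ _ hp2]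
    have hlen : (r.set p.2.toNat (v p.2)).length = r.length := by simp
    rw [ih _ j (by omega) (fun q hq => hpos q (List.mem_cons_of_mem _ hq))]
    by_cases hpj : p.2 = (j : Int)
    · have htn : p.2.toNat = j := by omega
      have hcond : ∃ q ∈ p :: ps, q.2 = (j : Int) := ⟨p, List.mem_cons_self, hpj⟩
      rw [if_pos hcond]
      split
      · rfl
      · rw [htn, List.getElem?_set_self (by omega), hpj]
    · have htn : p.2.toNat ≠ j := by omega
      rw [List.getElem?_set_ne htn]
      have hcond : (∃ q ∈ p :: ps, q.2 = (j : Int)) ↔ ∃ q ∈ ps, q.2 = (j : Int) := by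
        simp only [List.mem_cons]
        constructor
        · rintro ⟨q, (rfl | hq), h2⟩
          · exact absurd h2 hpj
          · exact ⟨q, hq, h2⟩
        · rintro ⟨q, hq, h2⟩; exact ⟨q, Or.inr hq, h2⟩
      simp only [hcond]

theorem length_foldl_fix (B : List Int) :
    ∀ (is : List Int) (r : List (Option Int)),
      (is.foldl (fun r i =>
        if pvFalsy (PySem.List.pyGetD r i none) then
          PySem.List.pySetD r i (some (PySem.List.pyGetD B i 0))
        else r) r).length = r.length := by
  intro is
  induction is with
  | nil => intro r; rfl
  | cons i is ih =>
    intro r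
    rw [List.foldl_cons, ih]
    split
    · rw [PySem.List.length_pySetD]
    · rfl

-- the second loop: each position j is read and rewritten exactly once
theorem foldl_fix_getElem? (B : List Int) :
    ∀ (is : List Int) (r : List (Option Int)) (j : Nat), j < r.length → is.Nodup →
      (∀ i ∈ is, 0 ≤ i) →
      (is.foldl (fun r i =>
          if pvFalsy (PySem.List.pyGetD r i none) then
            PySem.List.pySetD r i (some (PySem.List.pyGetD B i 0))
          else r) r)[j]? =
        if (j : Int) ∈ is then
          some (if pvFalsy (r.getD j none) then some (PySem.List.pyGetD B (j : Int) 0)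
                else r.getD j none)
        else r[j]? := by
  intro is
  induction is with
  | nil => intro r j hj _ _; simp
  | cons i is ih =>
    intro r j hj hnd hpos
    have hi0 : 0 ≤ i := hpos i List.mem_cons_self
    rw [List.foldl_cons]
    have hrlen : (if pvFalsy (PySem.List.pyGetD r i none) then
        PySem.List.pySetD r i (some (PySem.List.pyGetD B i 0)) else r).length = r.length := by
      split
      · rw [PySem.List.length_pySetD]
      · rfl
    rw [ih _ j (by omega) hnd.of_cons (fun a ha => hpos a (List.mem_cons_of_mem _ ha))]
    by_cases hij : i = (j : Int)
    · subst hij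
      have hgd : PySem.List.pyGetD r ((j : Nat) : Int) none = r.getD j none :=
        PySem.List.pyGetD_natCast r j none
      have hnotmem : ((j : Nat) : Int) ∉ is := (List.nodup_cons.mp hnd).1
      rw [if_neg hnotmem, if_pos List.mem_cons_self]
      split
      · rename_i hf
        rw [hgd] at hf
        rw [PySem.List.pySetD_of_nonneg _ _ hi0]
        simp only [Int.toNat_natCast]
        rw [List.getElem?_set_self hj, if_pos hf]
      · rename_i hf
        rw [hgd] at hf
        rw [if_neg hf, List.getElem?_eq_getElem hj, List.getD_eq_getElem _ _ hj]
    · have hmem : ((j : Int) ∈ i :: is) ↔ ((j : Int) ∈ is) := by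
        simp only [List.mem_cons]
        constructor
        · rintro (h | h)
          · exact absurd h.symm hij
          · exact h
        · exact Or.inr
      have hset : (if pvFalsy (PySem.List.pyGetD r i none) then
          PySem.List.pySetD r i (some (PySem.List.pyGetD B i 0)) else r)[j]? = r[j]? := by
        split
        · rw [PySem.List.pySetD_of_nonneg _ _ hi0, List.getElem?_set_ne (by omega)]
        · rfl
      have hgetD : (if pvFalsy (PySem.List.pyGetD r i none) then
          PySem.List.pySetD r i (some (PySem.List.pyGetD B i 0)) else r).getD j none
            = r.getD j none := by
        rw [List.getD_eq_getElem?_getD, hset, List.getD_eq_getElem?_getD]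
      simp only [hset, hgetD, hmem]

theorem countP_lt_of_mem {α : Type} (xs : List α) (p : α → Bool) (x : α) (hx : x ∈ xs)
    (hpx : ¬ p x = true) : xs.countP p < xs.length := by
  rcases Nat.lt_or_ge (xs.countP p) xs.length with h | h
  · exact h
  · have heq : xs.countP p = xs.length := le_antisymm List.countP_le_length h
    exact absurd (List.countP_eq_length.mp heq x hx) hpx

theorem pvEqFilter (pivot z : Int × Int) : ((z == pivot) && !(pairGt z pivot)) = (z == pivot) := by
  by_cases h : z = pivot
  · subst h; simp [pairGt]
  · simp [h]

theorem pvTri (pivot z : Int × Int) :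
    ((!(z == pivot)) && !(pairGt z pivot)) = pairGt pivot z := by
  rw [Bool.eq_iff_iff]
  simp only [Bool.and_eq_true, Bool.not_eq_true', beq_eq_false_iff_ne, ne_eq,
    pairGt_eq, decide_eq_false_iff_not, decide_eq_true_eq]
  constructor
  · rintro ⟨hne, hnlt⟩
    rcases lt_trichotomy (toLex z) (toLex pivot) with h | h | h
    · exact h
    · exact absurd (toLex.injective h) hne
    · exact absurd h hnlt
  · intro h
    exact ⟨fun he => absurd h (by rw [he]; exact lt_irrefl _), not_lt_of_gt h⟩

theorem partition_perm (xs : List (Int × Int)) (pivot : Int × Int) :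
    xs.Perm (xs.filter (fun z => pairGt z pivot) ++
      (xs.filter (fun z => z == pivot) ++ xs.filter (fun z => pairGt pivot z))) := by
  have h1 := (List.filter_append_perm (fun z => pairGt z pivot) xs).symm
  have h2 := (List.filter_append_perm (fun z => z == pivot)
    (xs.filter (fun z => !pairGt z pivot))).symm
  rw [List.filter_filter, List.filter_filter] at h2
  have he : xs.filter (fun z => (z == pivot) && !(pairGt z pivot)) =
      xs.filter (fun z => z == pivot) :=
    List.filter_congr (fun z _ => pvEqFilter pivot z)
  have hs : xs.filter (fun z => (!(z == pivot)) && !(pairGt z pivot)) =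
      xs.filter (fun z => pairGt pivot z) :=
    List.filter_congr (fun z _ => pvTri pivot z)
  rw [he, hs] at h2
  exact h1.trans (List.Perm.append_left _ h2)

theorem eqs_singleton (xs : List (Int × Int)) (pivot : Int × Int) (hnd : xs.Nodup)
    (hpm : pivot ∈ xs) : xs.filter (fun z => z == pivot) = [pivot] := by
  rw [List.filter_beq]
  have h1 : List.count pivot xs = 1 := by
    have hle := List.nodup_iff_count_le_one.mp hnd pivot
    have hge := List.count_pos_iff.mpr hpm
    omega
  rw [h1]
  rfl

theorem topkB_subset :
    ∀ (fuel : Nat) (xs : List (Int × Int)) (k : Nat) (x : Int × Int),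
      x ∈ topkB fuel xs k → x ∈ xs := by
  intro fuel
  induction fuel with
  | zero => intro xs k x hx; simp [topkB] at hx
  | succ fuel ih =>
    intro xs k x hx
    rw [topkB] at hx
    by_cases hk : k = 0
    · rw [if_pos hk] at hx; simp at hx
    rw [if_neg hk] at hx
    by_cases hxk : xs.length ≤ k
    · rwa [if_pos hxk] at hx
    rw [if_neg hxk] at hx
    set pivot := xs.getD (xs.length / 2) (0, 0) with hpiv
    set big := xs.filter (fun z => pairGt z pivot) with hbig
    set eqs := xs.filter (fun z => z == pivot) with heqsdef
    set small := xs.filter (fun z => pairGt pivot z) with hsmall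
    change x ∈ (if k ≤ big.length then topkB fuel big k
      else if k ≤ big.length + eqs.length then big ++ eqs.take (k - big.length)
      else big ++ eqs ++ topkB fuel small (k - big.length - eqs.length)) at hx
    split_ifs at hx with h1 h2
    · exact (List.mem_filter.mp (ih _ _ _ hx)).1
    · rcases List.mem_append.mp hx with h | h
      · exact (List.mem_filter.mp h).1
      · exact (List.mem_filter.mp (List.mem_of_mem_take h)).1
    · rcases List.mem_append.mp hx with h | h
      · rcases List.mem_append.mp h with h' | h'
        · exact (List.mem_filter.mp h').1
        · exact (List.mem_filter.mp h').1
      · exact (List.mem_filter.mp (ih _ _ _ h)).1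

theorem topkB_mem :
    ∀ (fuel : Nat) (xs : List (Int × Int)) (k : Nat), xs.length ≤ fuel → xs.Nodup →
      ∀ x : Int × Int,
        (x ∈ topkB fuel xs k ↔
          x ∈ xs ∧ xs.countP (fun y => decide (toLex x < toLex y)) < k) := by
  intro fuel
  induction fuel with
  | zero =>
    intro xs k hle hnd x
    have hxs : xs = [] := List.length_eq_zero_iff.mp (by omega)
    subst hxs
    simp [topkB]
  | succ fuel ih =>
    intro xs k hlen hnd x
    by_cases hxxs : x ∈ xs
    case neg =>
      constructor
      · intro hx; exact absurd (topkB_subset _ _ _ _ hx) hxxs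
      · rintro ⟨hx, -⟩; exact absurd hx hxxs
    rw [topkB]
    by_cases hk : k = 0
    · subst hk; simp
    rw [if_neg hk]
    by_cases hxk : xs.length ≤ k
    · rw [if_pos hxk]
      have hc : xs.countP (fun y => decide (toLex x < toLex y)) < xs.length :=
        countP_lt_of_mem xs _ x hxxs (by simp)
      constructor
      · intro hx; exact ⟨hx, by omega⟩
      · exact fun h => h.1
    rw [if_neg hxk]
    have hhalf : xs.length / 2 < xs.length := by omega
    have hpmem : xs.getD (xs.length / 2) (0, 0) ∈ xs := by
      rw [List.getD_eq_getElem _ _ hhalf]; exact List.getElem_mem _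
    set pivot := xs.getD (xs.length / 2) (0, 0) with hpiv
    set big := xs.filter (fun z => pairGt z pivot) with hbig
    set eqs := xs.filter (fun z => z == pivot) with heqsdef
    set small := xs.filter (fun z => pairGt pivot z) with hsmall
    change x ∈ (if k ≤ big.length then topkB fuel big k
      else if k ≤ big.length + eqs.length then big ++ eqs.take (k - big.length)
      else big ++ eqs ++ topkB fuel small (k - big.length - eqs.length)) ↔ _
    have heqs : eqs = [pivot] := eqs_singleton xs pivot hnd hpmem
    have hperm : xs.Perm (big ++ (eqs ++ small)) := partition_perm xs pivot
    have hcnt : ∀ p : (Int × Int) → Bool,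
        xs.countP p = big.countP p + eqs.countP p + small.countP p := by
      intro p
      rw [hperm.countP_eq, List.countP_append, List.countP_append]
      omega
    have hbignd : big.Nodup := hnd.filter _
    have hsmallnd : small.Nodup := hnd.filter _
    have hbiglt : big.length < xs.length :=
      List.length_filter_lt_length_iff_exists.mpr ⟨pivot, hpmem, by simp [pairGt]⟩
    have hsmalllt : small.length < xs.length :=
      List.length_filter_lt_length_iff_exists.mpr ⟨pivot, hpmem, by simp [pairGt]⟩
    have hmem_big : ∀ z, z ∈ big ↔ z ∈ xs ∧ toLex pivot < toLex z := by
      intro z; rw [hbig, List.mem_filter, pairGt_eq]; simp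
    have hmem_small : ∀ z, z ∈ small ↔ z ∈ xs ∧ toLex z < toLex pivot := by
      intro z; rw [hsmall, List.mem_filter, pairGt_eq]; simp
    have heqscnt : ∀ x : Int × Int,
        eqs.countP (fun y => decide (toLex x < toLex y)) =
          if toLex x < toLex pivot then 1 else 0 := by
      intro x
      rw [heqs, List.countP_cons, List.countP_nil]
      by_cases h : toLex x < toLex pivot <;> simp [h]
    rcases lt_trichotomy (toLex x) (toLex pivot) with hlt | heqx | hgt
    · -- x strictly below the pivot: x ∈ small
      have hxsmall : x ∈ small := (hmem_small x).mpr ⟨hxxs, hlt⟩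
      have hxnbig : x ∉ big := fun h => absurd ((hmem_big x).mp h).2 (lt_asymm hlt)
      have hxne : x ≠ pivot := fun he => absurd hlt (by rw [he]; exact lt_irrefl _)
      have hbigcnt : big.countP (fun y => decide (toLex x < toLex y)) = big.length :=
        List.countP_eq_length.mpr (fun z hz => by
          simpa using lt_trans hlt ((hmem_big z).mp hz).2)
      have hcntx : xs.countP (fun y => decide (toLex x < toLex y)) =
          big.length + 1 + small.countP (fun y => decide (toLex x < toLex y)) := by
        rw [hcnt, hbigcnt, heqscnt, if_pos hlt]
      have helen : eqs.length = 1 := by rw [heqs]; rfl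
      by_cases hb : k ≤ big.length
      · rw [if_pos hb]
        apply iff_of_false
        · intro hx
          exact hxnbig ((ih big k (by omega) hbignd x).mp hx).1
        · rintro ⟨-, hc⟩; omega
      · rw [if_neg hb]
        by_cases hb2 : k ≤ big.length + eqs.length
        · rw [if_pos hb2]
          have htake : eqs.take (k - big.length) = [pivot] := by
            rw [heqs]
            have hk1 : k - big.length = (k - big.length - 1) + 1 := by omega
            rw [hk1, List.take_succ_cons, List.take_nil]
          rw [htake]
          apply iff_of_false
          · intro hx
            rcases List.mem_append.mp hx with h | h
            · exact hxnbig h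
            · exact hxne (by simpa using h)
          · rintro ⟨-, hc⟩; omega
        · rw [if_neg hb2]
          have hih := ih small (k - big.length - eqs.length) (by omega) hsmallnd x
          constructor
          · intro hx
            rcases List.mem_append.mp hx with h | h
            · rcases List.mem_append.mp h with h' | h'
              · exact absurd h' hxnbig
              · exact absurd (by simpa [heqs] using h') hxne
            · have := (hih.mp h).2
              exact ⟨hxxs, by omega⟩
          · rintro ⟨-, hc⟩
            refine List.mem_append.mpr (Or.inr (hih.mpr ⟨hxsmall, ?_⟩))
            omega
    · -- x is the pivot
      have hxp : x = pivot := toLex.injective heqx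
      have hxnbig : x ∉ big := fun h =>
        absurd ((hmem_big x).mp h).2 (by rw [hxp]; exact lt_irrefl _)
      have hbigcnt : big.countP (fun y => decide (toLex x < toLex y)) = big.length :=
        List.countP_eq_length.mpr (fun z hz => by
          have h2 := ((hmem_big z).mp hz).2
          rw [← heqx] at h2
          simpa using h2)
      have hsmallcnt : small.countP (fun y => decide (toLex x < toLex y)) = 0 :=
        List.countP_eq_zero.mpr (fun z hz => by
          have h1 : toLex z < toLex x := heqx ▸ ((hmem_small z).mp hz).2
          simpa using lt_asymm h1)
      have hcntx : xs.countP (fun y => decide (toLex x < toLex y)) = big.length := by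
        rw [hcnt, hbigcnt, heqscnt, if_neg (by rw [heqx]; exact lt_irrefl _), hsmallcnt]
        omega
      have helen : eqs.length = 1 := by rw [heqs]; rfl
      by_cases hb : k ≤ big.length
      · rw [if_pos hb]
        apply iff_of_false
        · intro hx; exact hxnbig ((ih big k (by omega) hbignd x).mp hx).1
        · rintro ⟨-, hc⟩; omega
      · rw [if_neg hb]
        by_cases hb2 : k ≤ big.length + eqs.length
        · rw [if_pos hb2]
          have htake : eqs.take (k - big.length) = [pivot] := by
            rw [heqs]
            have hk1 : k - big.length = (k - big.length - 1) + 1 := by omega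
            rw [hk1, List.take_succ_cons, List.take_nil]
          rw [htake]
          apply iff_of_true
          · exact List.mem_append.mpr (Or.inr (by simp [hxp]))
          · exact ⟨hxxs, by omega⟩
        · rw [if_neg hb2]
          apply iff_of_true
          · refine List.mem_append.mpr (Or.inl (List.mem_append.mpr (Or.inr ?_)))
            rw [heqs]; simp [hxp]
          · exact ⟨hxxs, by omega⟩
    · -- x strictly above the pivot: x ∈ big
      have hxbig : x ∈ big := (hmem_big x).mpr ⟨hxxs, hgt⟩
      have heqscnt0 : eqs.countP (fun y => decide (toLex x < toLex y)) = 0 := by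
        rw [heqscnt, if_neg (lt_asymm hgt)]
      have hsmallcnt : small.countP (fun y => decide (toLex x < toLex y)) = 0 :=
        List.countP_eq_zero.mpr (fun z hz => by
          have h1 : toLex z < toLex x := lt_trans ((hmem_small z).mp hz).2 hgt
          simpa using lt_asymm h1)
      have hcntx : xs.countP (fun y => decide (toLex x < toLex y)) =
          big.countP (fun y => decide (toLex x < toLex y)) := by
        rw [hcnt, heqscnt0, hsmallcnt]
        omega
      have hble : big.countP (fun y => decide (toLex x < toLex y)) ≤ big.length :=
        List.countP_le_length
      by_cases hb : k ≤ big.length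
      · rw [if_pos hb]
        rw [ih big k (by omega) hbignd x, hcntx]
        exact ⟨fun ⟨_, h⟩ => ⟨hxxs, h⟩, fun ⟨_, h⟩ => ⟨hxbig, h⟩⟩
      · rw [if_neg hb]
        by_cases hb2 : k ≤ big.length + eqs.length
        · rw [if_pos hb2]
          apply iff_of_true
          · exact List.mem_append.mpr (Or.inl hxbig)
          · exact ⟨hxxs, by omega⟩
        · rw [if_neg hb2]
          apply iff_of_true
          · exact List.mem_append.mpr (Or.inl (List.mem_append.mpr (Or.inl hxbig)))
          · exact ⟨hxxs, by omega⟩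

theorem pvHalf (A : List Int) :
    PySem.Int.floordiv (PySem.List.len A) 2 = ((A.length / 2 : Nat) : Int) := by
  rw [PySem.List.len_eq, PySem.Int.floordiv_eq_ediv_of_pos (by norm_num)]
  omega

theorem pvRes1_eq (A B : List Int) :
    pvRes1 A B = (PySem.List.pyRange 0 ((A.length / 2 : Nat) : Int)).foldl
      (fun r i =>
        PySem.List.pySetD r (PySem.List.pyGetD (pvS A B) i (0, 0)).2
          (some (PySem.List.pyGetD A (PySem.List.pyGetD (pvS A B) i (0, 0)).2 0)))
      (List.replicate A.length none) := by
  unfold pvRes1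
  rw [pvHalf]
  rfl

theorem pvRes1_length (A B : List Int) : (pvRes1 A B).length = A.length := by
  rw [pvRes1_eq]
  rw [length_foldl_set (fun i => (PySem.List.pyGetD (pvS A B) i (0, 0)).2)
    (fun i => some (PySem.List.pyGetD A (PySem.List.pyGetD (pvS A B) i (0, 0)).2 0))]
  exact List.length_replicate

theorem pvS_take_snd (A B : List Int) (j : Nat) (hj : j < A.length) :
    (∃ p ∈ (pvS A B).take (A.length / 2), p.2 = (j : Int)) ↔
      pvKey A B j ∈ (pvS A B).take (A.length / 2) := by
  constructor
  · rintro ⟨p, hp, h2⟩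
    obtain ⟨i, hi, rfl⟩ := (pvS_mem A B p).1 (List.mem_of_mem_take hp)
    have hij : i = j := by simpa [pvKey] using h2
    subst hij
    exact hp
  · intro h
    exact ⟨pvKey A B j, h, rfl⟩

theorem pvRes1_getElem (A B : List Int) (j : Nat) (hj : j < A.length) :
    (pvRes1 A B)[j]? =
      some (if pvKey A B j ∈ (pvS A B).take (A.length / 2) then some (A.getD j 0) else none) := by
  have hk : A.length / 2 ≤ (pvS A B).length := by rw [pvS_length]; omega
  rw [pvRes1_eq, foldl_pyRange_take (pvS A B) (0, 0)
    (fun r p => PySem.List.pySetD r p.2 (some (PySem.List.pyGetD A p.2 0))) (A.length / 2)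
    (List.replicate A.length none) hk]
  rw [foldl_set_getElem? (fun i => some (PySem.List.pyGetD A i 0)) _ _ j
    (by simpa using hj)
    (by
      intro p hp
      obtain ⟨i, hi, rfl⟩ := (pvS_mem A B p).1 (List.mem_of_mem_take hp)
      simp [pvKey])]
  rw [List.getElem?_replicate, if_pos hj]
  by_cases hsel : pvKey A B j ∈ (pvS A B).take (A.length / 2)
  · rw [if_pos ((pvS_take_snd A B j hj).mpr hsel), if_pos hsel, PySem.List.pyGetD_natCast]
  · rw [if_neg (fun hc => hsel ((pvS_take_snd A B j hj).mp hc)), if_neg hsel]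

theorem pvRange_eq (A : List Int) :
    PySem.List.pyRange 0 (PySem.List.len A) =
      (List.range A.length).map (fun k : Nat => (k : Int)) := by
  rw [PySem.List.len_eq]
  exact PySem.List.pyRange_zero_natCast A.length

theorem pvRes2_getElem (A B : List Int) (j : Nat) (hj : j < A.length) :
    (pvRes2 A B)[j]? =
      some (if pvFalsy ((pvRes1 A B).getD j none) then some (PySem.List.pyGetD B (j : Int) 0)
            else (pvRes1 A B).getD j none) := by
  have hlen1 : (pvRes1 A B).length = A.length := pvRes1_length A B
  unfold pvRes2
  rw [pvRange_eq]
  rw [foldl_fix_getElem? B _ _ j (by omega)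
    (List.nodup_range.map Nat.cast_injective)
    (by rintro i hi; obtain ⟨m, -, rfl⟩ := List.mem_map.mp hi; positivity)]
  rw [if_pos (List.mem_map.mpr ⟨j, List.mem_range.mpr hj, rfl⟩)]

theorem pvSelected_iff (A B : List Int) (j : Nat) (hj : j < A.length) :
    pvKey A B j ∈ (pvS A B).take (A.length / 2) ↔ pvSelected A B j := by
  have hx : pvKey A B j ∈ pvS A B := (pvS_mem A B _).2 ⟨j, hj, rfl⟩
  rw [mem_take_iff_countP (pvS A B) (pvS_sorted A B) _ hx]
  unfold pvSelected
  rw [(pvS_perm A B).countP_eq, pvDiff_eq, List.countP_map]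
  rfl

theorem pvTop_mem (A B : List Int) (j : Nat) (hj : j < A.length) :
    pvKey A B j ∈ topkB (pvDiff A B).length (pvDiff A B) (A.length / 2) ↔ pvSelected A B j := by
  rw [topkB_mem (pvDiff A B).length (pvDiff A B) (A.length / 2) le_rfl (pvDiff_nodup A B)]
  unfold pvSelected
  constructor
  · rintro ⟨-, h⟩
    rw [pvDiff_eq, List.countP_map] at h
    exact h
  · intro h
    refine ⟨by rw [pvDiff_eq]; exact List.mem_map.mpr ⟨j, List.mem_range.mpr hj, rfl⟩, ?_⟩
    rw [pvDiff_eq, List.countP_map]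
    exact h

theorem maxElements_alt_eq (A B : List Int) :
    maxElements_alt A B = (PySem.List.pyRange 0 (PySem.List.len A)).map
      (fun i => if PySem.Set.contains (PySem.Set.ofList
          ((topkB (pvDiff A B).length (pvDiff A B) (A.length / 2)).map (·.2))) i
        then PySem.List.pyGetD A i 0 else PySem.List.pyGetD B i 0) := rfl

-- characterization of A's output
theorem maxElements_char (A B : List Int) (_hpre : A.length ≤ B.length) (j : Nat)
    (hj : j < A.length) :
    (maxElements A B)[j]? =
      some (if pvSelected A B j ∧ A.getD j 0 ≠ 0 then A.getD j 0 else B.getD j 0) := by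
  have h2 := pvRes2_getElem A B j hj
  have h1 := pvRes1_getElem A B j hj
  have hgd : (pvRes1 A B).getD j none =
      (if pvKey A B j ∈ (pvS A B).take (A.length / 2) then some (A.getD j 0) else none) := by
    rw [List.getD_eq_getElem?_getD, h1]
    rfl
  rw [maxElements_eq, List.getElem?_map, h2, hgd, PySem.List.pyGetD_natCast]
  simp only [Option.map_some]
  by_cases hsel : pvSelected A B j
  · have hmem : pvKey A B j ∈ (pvS A B).take (A.length / 2) := (pvSelected_iff A B j hj).mpr hsel
    rw [if_pos hmem]
    by_cases hz : A.getD j 0 = 0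
    · rw [if_pos (by simp only [pvFalsy]; exact beq_iff_eq.mpr hz), if_neg (by tauto)]
      rfl
    · rw [if_neg (by simp only [pvFalsy]; exact fun hc => hz (beq_iff_eq.mp hc)),
        if_pos ⟨hsel, hz⟩]
      rfl
  · have hmem : pvKey A B j ∉ (pvS A B).take (A.length / 2) :=
      fun hc => hsel ((pvSelected_iff A B j hj).mp hc)
    rw [if_neg hmem, if_pos (by simp [pvFalsy]), if_neg (by tauto)]
    rfl

theorem maxElements_length (A B : List Int) : (maxElements A B).length = A.length := by
  rw [maxElements_eq, List.length_map]
  unfold pvRes2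
  rw [length_foldl_fix, pvRes1_length]

-- characterization of B's output
theorem maxElements_alt_char (A B : List Int) (j : Nat) (hj : j < A.length) :
    (maxElements_alt A B)[j]? =
      some (if pvSelected A B j then A.getD j 0 else B.getD j 0) := by
  rw [maxElements_alt_eq, pvRange_eq, List.map_map, List.getElem?_map, List.getElem?_range hj]
  simp only [Option.map_some, Function.comp_apply, PySem.List.pyGetD_natCast]
  have hcont : (PySem.Set.contains (PySem.Set.ofList
      ((topkB (pvDiff A B).length (pvDiff A B) (A.length / 2)).map (·.2))) ((j : Nat) : Int) = true)
      ↔ pvSelected A B j := by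
    rw [PySem.Set.contains_iff, PySem.Set.mem_ofList, List.mem_map]
    constructor
    · rintro ⟨p, hp, h2⟩
      have hpd := topkB_subset _ _ _ _ hp
      rw [pvDiff_eq] at hpd
      obtain ⟨i, hi, rfl⟩ := List.mem_map.mp hpd
      have hij : i = j := by simpa [pvKey] using h2
      subst hij
      exact (pvTop_mem A B i hj).mp hp
    · intro h
      exact ⟨pvKey A B j, (pvTop_mem A B j hj).mpr h, rfl⟩
  by_cases hsel : pvSelected A B j
  · rw [if_pos (hcont.mpr hsel), if_pos hsel]
  · rw [if_neg (fun hc => hsel (hcont.mp hc)), if_neg hsel]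

theorem maxElements_alt_length (A B : List Int) : (maxElements_alt A B).length = A.length := by
  rw [maxElements_alt_eq, List.length_map, pvRange_eq, List.length_map, List.length_range]

theorem D_iff (A B : List Int) :
    D_maxElements A B ↔ ∃ j, j < A.length ∧ A.getD j 0 = 0 ∧ B.getD j 0 ≠ 0 ∧ pvSelected A B j := by
  unfold D_maxElements pvSelected pvKey
  simp [List.mem_range]

-- ===== VERDICT (by name: the statement is the Claim_ definition above) =====
theorem maxElements_spec : Claim_unchanged_maxElements := by
  intro A B _ hpre hnD
  apply List.ext_getElem?
  intro j
  by_cases hj : j < A.length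
  · rw [maxElements_char A B hpre j hj, maxElements_alt_char A B j hj]
    by_cases hsel : pvSelected A B j
    · by_cases hz : A.getD j 0 = 0
      · have hBz : B.getD j 0 = 0 := by
          by_contra hBz
          exact hnD ((D_iff A B).2 ⟨j, hj, hz, hBz, hsel⟩)
        rw [if_neg (by tauto), if_pos hsel, hz, hBz]
      · rw [if_pos ⟨hsel, hz⟩, if_pos hsel]
    · rw [if_neg (by tauto), if_neg hsel]
  · rw [List.getElem?_eq_none (by rw [maxElements_length]; omega),
        List.getElem?_eq_none (by rw [maxElements_alt_length]; omega)]

theorem maxElements_changed : Claim_changed_maxElements := by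
  unfold Claim_changed_maxElements; decide

theorem maxElements_tight : Claim_exact_maxElements := by
  intro A B _ hpre hD heq
  obtain ⟨j, hj, hz, hBz, hsel⟩ := (D_iff A B).1 hD
  have h1 := maxElements_char A B hpre j hj
  have h2 := maxElements_alt_char A B j hj
  rw [heq, h2] at h1
  simp only [Option.some.injEq] at h1
  rw [if_pos hsel, if_neg (by tauto), hz] at h1
  exact hBz h1.symm
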